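-- pv_equiv track=rewrite | github.com/tobias1248/INCITE | PyCT-Influence-Transformer/libct/shapInfl.py | unflatten_index
-- ===== SOURCE A (Python) =====
-- from typing import Literal, Tuple
--
-- def unflatten_index(flattened_index: int, original_input_shape: Tuple[int, ...]) -> Tuple[int, ...]:
--     # recover indices from the flattened_index, given the original_input_shape
--     indices = []
--     current_modular = original_input_shape[-1]
--     current_divisor = 1
--     reversed_shape = tuple(reversed(original_input_shape))
--     for (i, d) in enumerate(reversed_shape):
--         indices.append(flattened_index % current_modular // current_divisor)
--         current_divisor = current_modular
--         if i+1 < len(reversed_shape):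
--             current_modular *= reversed_shape[i+1]
--     return tuple(reversed(indices))
-- ===== SOURCE B (Python) =====
-- def unflatten_index(flattened_index, original_input_shape):
--     # recover indices from the flattened_index via a strides table:
--     # strides[i] = product of original_input_shape[i+1:], built in one
--     # right-to-left pass; each coordinate is then an independent
--     # flattened_index // stride % dim computation.
--     strides = []
--     acc = 1
--     for d in reversed(original_input_shape):
--         strides.append(acc)
--         acc *= d
--     strides.reverse()
--     return tuple(flattened_index // s % d
--                  for d, s in zip(original_input_shape, strides))
-- ===== Notes on version B (the rewrite author's own statement) =====
-- stated objective: alternative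
-- what changed: B builds a strides table in one right-to-left pass (stride[i] = product of shape[i+1:]) and then computes each coordinate independently as flattened_index // stride % dim, replacing A's single loop that threads a growing modulus/divisor pair through reversed enumeration.
-- outside the precondition, e.g. on unflatten_index(23, (-2, -3, 1)): A returns (-2, -1, 0), B returns (0, -1, 0)
import Mathlib
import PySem

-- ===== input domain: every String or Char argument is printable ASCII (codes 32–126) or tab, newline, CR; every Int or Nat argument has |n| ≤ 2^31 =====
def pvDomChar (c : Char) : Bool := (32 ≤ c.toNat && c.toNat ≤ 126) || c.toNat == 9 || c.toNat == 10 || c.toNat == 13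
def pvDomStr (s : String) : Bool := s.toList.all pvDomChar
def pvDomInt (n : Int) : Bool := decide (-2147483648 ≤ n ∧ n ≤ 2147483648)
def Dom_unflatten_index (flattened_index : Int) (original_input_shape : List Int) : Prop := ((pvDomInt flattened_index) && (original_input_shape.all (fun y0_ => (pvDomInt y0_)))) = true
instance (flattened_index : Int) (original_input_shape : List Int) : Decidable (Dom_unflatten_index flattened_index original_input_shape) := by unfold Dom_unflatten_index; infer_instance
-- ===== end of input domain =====

-- ===== PORT A =====
-- Port of A: one loop over the reversed shape threading (modulus, divisor).
def unflatten_index (flattened_index : Int) (original_input_shape : List Int) : List Int :=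
  -- original_input_shape[-1]: IndexError on the empty shape (excluded by Pre_)
  match PySem.List.pyGet? original_input_shape (-1) with
  | none => []
  | some current_modular0 =>
    let reversed_shape := original_input_shape.reverse
    -- for (i, d) in enumerate(reversed_shape): d is unused by the loop body.
    -- flattened_index % current_modular: ZeroDivisionError when the modulus is 0
    -- (a 0 dimension; excluded by Pre_ — PySem.Int.mod is total there).
    let final := (PySem.List.enumerate reversed_shape).foldl
      (fun (st : List Int × Int × Int) (p : Int × Int) =>
        (st.1 ++ [PySem.Int.floordiv (PySem.Int.mod flattened_index st.2.1) st.2.2],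
         if p.1 + 1 < PySem.List.len reversed_shape
         then st.2.1 * PySem.List.pyGetD reversed_shape (p.1 + 1) 0
         else st.2.1,
         st.2.1))
      ([], current_modular0, 1)
    final.1.reverse

-- ===== PORT B =====
-- B: build the strides table right-to-left, then compute each coordinate
-- independently as flattened_index // stride % dim.
def unflatten_index_alt (flattened_index : Int) (original_input_shape : List Int) : List Int :=
  let st := original_input_shape.reverse.foldl
    (fun (st : List Int × Int) d => (st.1 ++ [st.2], st.2 * d)) ([], 1)
  let strides := st.1.reverse
  (original_input_shape.zip strides).map
    (fun p => PySem.Int.mod (PySem.Int.floordiv flattened_index p.2) p.1)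

-- ===== PRECONDITION & SPEC =====
-- Pre_ restricts to the natural domain of a shape: nonempty with all positive
-- dimensions. A raises IndexError on the empty shape and ZeroDivisionError on a
-- shape containing 0; on shapes with NEGATIVE dimensions (malformed input) A
-- still returns a value, but those values are incidental to its modulus chain
-- and B's strides formula legitimately disagrees there, so they are excluded.
def Pre_unflatten_index (flattened_index : Int) (original_input_shape : List Int) : Prop :=
  original_input_shape ≠ [] ∧ ∀ d ∈ original_input_shape, 0 < d
instance (flattened_index : Int) (original_input_shape : List Int) : Decidable (Pre_unflatten_index flattened_index original_input_shape) := by unfold Pre_unflatten_index; infer_instance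

def pvWitness_unflatten_index : Int × List Int := (7, [2, 3, 4])

def Spec_unflatten_index (flattened_index : Int) (original_input_shape : List Int) (out : List Int) : Prop := out = unflatten_index_alt flattened_index original_input_shape
instance (flattened_index : Int) (original_input_shape : List Int) (out : List Int) : Decidable (Spec_unflatten_index flattened_index original_input_shape out) := by unfold Spec_unflatten_index; infer_instance

-- ===== CLAIM (what is proved, stated in full; the proofs are below) =====
def Claim_equal_unflatten_index : Prop := ∀ (flattened_index : Int) (original_input_shape : List Int), Dom_unflatten_index flattened_index original_input_shape → Pre_unflatten_index flattened_index original_input_shape → Spec_unflatten_index flattened_index original_input_shape (unflatten_index flattened_index original_input_shape)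

-- ===== LEMMAS AND PROOFS =====

-- floored division/modulus identity behind the equivalence:
-- (x % (s*m)) // s = (x // s) % m for positive s, m (here on ediv/emod,
-- which agree with Python's // and % for positive divisors).
theorem pv_ediv_key (x s m : Int) (hs : 0 < s) (hm : 0 < m) :
    x % (s * m) / s = x / s % m := by
  have hsm : 0 < s * m := mul_pos hs hm
  have hx : x = x % (s * m) + (m * (x / (s * m))) * s := by
    have := Int.mul_ediv_add_emod x (s * m); ring_nf; ring_nf at this; omega
  have hr0 : 0 ≤ x % (s * m) := Int.emod_nonneg x (ne_of_gt hsm)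
  have hrlt : x % (s * m) < s * m := Int.emod_lt_of_pos x hsm
  have hdiv : x / s = x % (s * m) / s + m * (x / (s * m)) := by
    conv_lhs => rw [hx]
    rw [Int.add_mul_ediv_right _ _ (ne_of_gt hs)]
  rw [hdiv, Int.add_mul_emod_self_left]
  refine (Int.emod_eq_of_lt (Int.ediv_nonneg hr0 (le_of_lt hs)) ?_).symm
  rw [Int.ediv_lt_iff_lt_mul hs]
  linarith [hrlt]

theorem pv_point (x s m : Int) (hs : 0 < s) (hm : 0 < m) :
    PySem.Int.floordiv (PySem.Int.mod x (s * m)) s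
      = PySem.Int.mod (PySem.Int.floordiv x s) m := by
  rw [PySem.Int.mod_eq_emod_of_pos (mul_pos hs hm),
      PySem.Int.floordiv_eq_ediv_of_pos hs,
      PySem.Int.floordiv_eq_ediv_of_pos hs,
      PySem.Int.mod_eq_emod_of_pos hm]
  exact pv_ediv_key x s m hs hm

-- invariant of A's loop: after starting at position k with the correct
-- (modulus, divisor) pair, the indices list extends by one floored quotient
-- per remaining position.
theorem pv_foldA (fi : Int) (rev : List Int) (k : Nat) (acc : List Int) (cm : Int)
    (hk : k ≤ rev.length)
    (hcm : k < rev.length → cm = (rev.take (k + 1)).prod) :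
    ((PySem.List.enumerate (rev.drop k) (k : Int)).foldl
      (fun (st : List Int × Int × Int) (p : Int × Int) =>
        (st.1 ++ [PySem.Int.floordiv (PySem.Int.mod fi st.2.1) st.2.2],
         if p.1 + 1 < PySem.List.len rev
         then st.2.1 * PySem.List.pyGetD rev (p.1 + 1) 0
         else st.2.1,
         st.2.1))
      (acc, cm, (rev.take k).prod)).1
    = acc ++ (List.range' k (rev.length - k)).map
        (fun i => PySem.Int.floordiv (PySem.Int.mod fi ((rev.take (i + 1)).prod))
          ((rev.take i).prod)) := by
  suffices H : ∀ (j k : Nat) (acc : List Int) (cm : Int), rev.length - k = j → k ≤ rev.length →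
      (k < rev.length → cm = (rev.take (k + 1)).prod) →
      ((PySem.List.enumerate (rev.drop k) (k : Int)).foldl
        (fun (st : List Int × Int × Int) (p : Int × Int) =>
          (st.1 ++ [PySem.Int.floordiv (PySem.Int.mod fi st.2.1) st.2.2],
           if p.1 + 1 < PySem.List.len rev
           then st.2.1 * PySem.List.pyGetD rev (p.1 + 1) 0
           else st.2.1,
           st.2.1))
        (acc, cm, (rev.take k).prod)).1
      = acc ++ (List.range' k (rev.length - k)).map
          (fun i => PySem.Int.floordiv (PySem.Int.mod fi ((rev.take (i + 1)).prod))
            ((rev.take i).prod)) from H _ k acc cm rfl hk hcm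
  intro j
  induction j with
  | zero =>
    intro k acc cm hj hk hcm
    have hkn : k = rev.length := by omega
    subst hkn
    simp [List.drop_length]
  | succ j ih =>
    intro k acc cm hj hk hcm
    have hklt : k < rev.length := by omega
    have hcmv := hcm hklt
    subst hcmv
    rw [List.drop_eq_getElem_cons hklt]
    rw [show PySem.List.enumerate (rev[k] :: rev.drop (k + 1)) (k : Int)
        = ((k : Int), rev[k]) :: PySem.List.enumerate (rev.drop (k + 1)) ((k : Int) + 1)
      from by simp [PySem.List.enumerate]]
    rw [List.foldl_cons]
    have hcast : ((k : Int) + 1) = ((k + 1 : Nat) : Int) := by push_cast; ring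
    rw [hcast]
    have hcm' : k + 1 < rev.length →
        (if ((k + 1 : Nat) : Int) < PySem.List.len rev
         then (rev.take (k + 1)).prod * PySem.List.pyGetD rev ((k + 1 : Nat) : Int) 0
         else (rev.take (k + 1)).prod) = (rev.take (k + 1 + 1)).prod := by
      intro h
      rw [if_pos (by simp [PySem.List.len_eq]; exact_mod_cast h)]
      rw [PySem.List.pyGetD_natCast, List.getD_eq_getElem _ _ h,
          List.prod_take_succ rev (k + 1) h]
    rw [ih (k + 1) _ _ (by omega) (by omega) hcm']
    rw [show rev.length - k = (rev.length - (k + 1)) + 1 from by omega, List.range'_succ,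
        List.map_cons]
    simp

-- invariant of B's strides loop: it emits the running products.
theorem pv_foldB (t : List Int) (acc : List Int) (a : Int) :
    (t.foldl (fun (st : List Int × Int) d => (st.1 ++ [st.2], st.2 * d)) (acc, a)).1
    = acc ++ (List.range t.length).map (fun i => a * (t.take i).prod) := by
  induction t generalizing acc a with
  | nil => simp
  | cons d t ih =>
    rw [List.foldl_cons, ih]
    simp only [List.length_cons, List.range_succ_eq_map, List.map_cons, List.map_map]
    simp [Function.comp, List.take_succ_cons, List.prod_cons, mul_assoc]

theorem unflatten_index_spec : Claim_equal_unflatten_index := by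
  intro fi shape _ hpre
  obtain ⟨hne, hpos⟩ := hpre
  unfold Spec_unflatten_index unflatten_index unflatten_index_alt
  obtain ⟨x, t, hx⟩ : ∃ x t, shape.reverse = x :: t := by
    cases h : shape.reverse with
    | nil => exact absurd (by simpa using congrArg List.reverse h) hne
    | cons a b => exact ⟨a, b, rfl⟩
  have hget : PySem.List.pyGet? shape (-1) = some x := by
    rw [PySem.List.pyGet?_neg_one, ← List.head?_reverse, hx]; rfl
  simp only [hget]
  have hA := pv_foldA fi shape.reverse 0 [] x (by omega)
    (fun _ => by rw [hx]; simp)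
  simp only [List.drop_zero, Nat.cast_zero, List.take_zero, List.prod_nil, Nat.sub_zero] at hA
  rw [hA]
  have hB := pv_foldB shape.reverse [] 1
  simp only [one_mul, List.nil_append] at hB
  rw [hB]
  rw [List.nil_append, ← List.range_eq_range']
  have hposr : ∀ d ∈ shape.reverse, 0 < d := fun d hd => hpos d (List.mem_reverse.1 hd)
  have hP : ∀ i : Nat, 0 < (List.take i shape.reverse).prod :=
    fun i => List.prod_pos (fun a ha => hposr a (List.mem_of_mem_take ha))
  apply List.ext_getElem
  · simp
  · intro j h1 h2
    simp only [List.getElem_reverse, List.getElem_map, List.getElem_zip, List.getElem_range,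
      List.length_map, List.length_range, List.length_reverse]
    have hj : j < shape.length := by simpa using h1
    have hi : shape.length - 1 - j < shape.reverse.length := by simp; omega
    rw [List.prod_take_succ _ _ hi, pv_point fi _ _ (hP _) (hposr _ (List.getElem_mem hi))]
    congr 1
    rw [List.getElem_reverse]
    simp [show shape.length - 1 - (shape.length - 1 - j) = j from by omega]
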